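-- pv_equiv track=rewrite | github.com/Wjndz/face-and-plate | face/recognition_test.py | combine_plate_lines
-- ===== SOURCE A (Python) =====
-- def combine_plate_lines(text_lines):
--     if not text_lines:
--         return ""
--     sorted_lines = sorted(text_lines, key=lambda x: x[0][0][1])
--     texts = [line[1] for line in sorted_lines]
--     if len(texts) >= 2:
--         return f"{texts[0].strip()} {texts[1].strip()}"
--     elif len(texts) == 1:
--         return texts[0].strip()
--     return ""
-- ===== SOURCE B (Python) =====
-- def combine_plate_lines(text_lines):
--     # One-pass selection of the two lines with smallest y (strict < keeps
--     # the earliest original index on ties, matching the stable sort).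
--     best = None
--     second = None
--     for line in text_lines:
--         y = line[0][0][1]
--         if best is None or y < best[0]:
--             second = best
--             best = (y, line[1])
--         elif second is None or y < second[0]:
--             second = (y, line[1])
--     if best is None:
--         return ""
--     if second is None:
--         return best[1].strip()
--     return f"{best[1].strip()} {second[1].strip()}"
-- ===== Notes on version B (the rewrite author's own statement) =====
-- stated objective: alternative
-- what changed: Replaces the stable sort of all lines by a single pass keeping only the two lines with smallest y (strict < so equal-y ties keep the earliest line, as the stable sort does).
import Mathlib
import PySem

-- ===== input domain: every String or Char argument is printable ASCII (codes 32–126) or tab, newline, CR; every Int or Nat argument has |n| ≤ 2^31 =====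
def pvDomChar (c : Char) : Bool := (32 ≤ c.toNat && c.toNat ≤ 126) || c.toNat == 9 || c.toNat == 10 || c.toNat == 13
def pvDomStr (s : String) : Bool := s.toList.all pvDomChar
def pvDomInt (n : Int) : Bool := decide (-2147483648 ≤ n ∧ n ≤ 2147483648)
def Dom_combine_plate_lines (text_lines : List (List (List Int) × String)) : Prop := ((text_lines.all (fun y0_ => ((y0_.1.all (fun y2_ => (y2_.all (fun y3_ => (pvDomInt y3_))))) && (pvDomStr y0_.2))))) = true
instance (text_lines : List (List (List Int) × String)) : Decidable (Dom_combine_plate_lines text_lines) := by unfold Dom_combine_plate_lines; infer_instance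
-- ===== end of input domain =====

-- B replaces A's stable sort of all lines by one pass keeping the two lines of smallest y
-- (strict < so equal-y ties keep the earliest line, as the stable sort does); same output.

-- ===== PORT A =====
-- the sort key lambda x: x[0][0][1] (total with defaults; Pre_ excludes the inputs where Python's indexing raises)
def pvKey (x : List (List Int) × String) : Int :=
  PySem.List.pyGetD (PySem.List.pyGetD x.1 0 []) 1 0

def combine_plate_lines (text_lines : List (List (List Int) × String)) : String :=
  if text_lines = [] then ""
  else
    let sorted_lines := PySem.List.sorted text_lines pvKey
    let texts := sorted_lines.map (fun line => line.2)
    if 2 ≤ texts.length then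
      PySem.Str.strip (PySem.List.pyGetD texts 0 "") ++ " " ++ PySem.Str.strip (PySem.List.pyGetD texts 1 "")
    else if texts.length = 1 then
      PySem.Str.strip (PySem.List.pyGetD texts 0 "")
    else ""

-- ===== PORT B =====
-- loop body: update (best, second) with the current line
def pvStep (s : Option (Int × String) × Option (Int × String)) (line : List (List Int) × String) :
    Option (Int × String) × Option (Int × String) :=
  let y := pvKey line
  match s with
  | (none, _) => (some (y, line.2), none)
  | (some b, snd) =>
    if y < b.1 then (some (y, line.2), some b)
    else
      match snd with
      | none => (some b, some (y, line.2))
      | some c => if y < c.1 then (some b, some (y, line.2)) else (some b, some c)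

def combine_plate_lines_alt (text_lines : List (List (List Int) × String)) : String :=
  match text_lines.foldl pvStep (none, none) with
  | (none, _) => ""
  | (some b, none) => PySem.Str.strip b.2
  | (some b, some c) => PySem.Str.strip b.2 ++ " " ++ PySem.Str.strip c.2

-- ===== PRECONDITION & SPEC =====
-- Pre_ excludes exactly the inputs where A's key lambda raises IndexError (a line whose
-- box list is empty or whose first point has fewer than two coordinates).
def Pre_combine_plate_lines (text_lines : List (List (List Int) × String)) : Prop :=
  ∀ p ∈ text_lines, p.1 ≠ [] ∧ 2 ≤ (p.1.headI).length
instance (text_lines : List (List (List Int) × String)) : Decidable (Pre_combine_plate_lines text_lines) := by unfold Pre_combine_plate_lines; infer_instance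

def pvWitness_combine_plate_lines : (List (List (List Int) × String)) :=
  [([[10, 7]], " ABC "), ([[11, 3]], "XY")]

def Spec_combine_plate_lines (text_lines : List (List (List Int) × String)) (out : String) : Prop := out = combine_plate_lines_alt text_lines
instance (text_lines : List (List (List Int) × String)) (out : String) : Decidable (Spec_combine_plate_lines text_lines out) := by unfold Spec_combine_plate_lines; infer_instance

-- ===== CLAIM (what is proved, stated in full; the proofs are below) =====
def Claim_equal_combine_plate_lines : Prop := ∀ (text_lines : List (List (List Int) × String)), Dom_combine_plate_lines text_lines → Pre_combine_plate_lines text_lines → Spec_combine_plate_lines text_lines (combine_plate_lines text_lines)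

-- ===== LEMMAS AND PROOFS =====

-- the (best, second) state B maintains, read off the first two elements of a list
def pvFirstTwo : List (List (List Int) × String) → Option (Int × String) × Option (Int × String)
  | [] => (none, none)
  | [a] => (some (pvKey a, a.2), none)
  | a :: b :: _ => (some (pvKey a, a.2), some (pvKey b, b.2))

lemma pvFirstTwo_insertBy (x : List (List Int) × String) (acc : List (List (List Int) × String)) :
    pvFirstTwo (PySem.List.insertBy (fun a b => decide (pvKey a < pvKey b)) x acc)
      = pvStep (pvFirstTwo acc) x := by
  match acc with
  | [] => simp [PySem.List.insertBy, pvFirstTwo, pvStep]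
  | [a] =>
    simp only [PySem.List.insertBy, pvFirstTwo, pvStep]
    by_cases h : pvKey x < pvKey a <;> simp [h]
  | a :: b :: t =>
    simp only [PySem.List.insertBy, pvFirstTwo, pvStep]
    by_cases h1 : pvKey x < pvKey a
    · simp [h1]
    · by_cases h2 : pvKey x < pvKey b <;> simp [h1, h2]

lemma pvFirstTwo_foldl (xs : List (List (List Int) × String)) (acc : List (List (List Int) × String)) :
    pvFirstTwo (xs.foldl (fun acc x => PySem.List.insertBy (fun a b => decide (pvKey a < pvKey b)) x acc) acc)
      = xs.foldl pvStep (pvFirstTwo acc) := by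
  induction xs generalizing acc with
  | nil => rfl
  | cons x xs ih => simp only [List.foldl_cons, ih, pvFirstTwo_insertBy]

lemma pvState_eq (xs : List (List (List Int) × String)) :
    xs.foldl pvStep (none, none) = pvFirstTwo (PySem.List.sorted xs pvKey) := by
  rw [PySem.List.sorted_eq_foldl_insertBy, pvFirstTwo_foldl]
  rfl

-- ===== VERDICT (by name: the statement is the Claim_ definition above) =====
theorem combine_plate_lines_spec : Claim_equal_combine_plate_lines := by
  intro tl _ _
  show combine_plate_lines tl = combine_plate_lines_alt tl
  unfold combine_plate_lines combine_plate_lines_alt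
  rw [pvState_eq]
  by_cases hnil : tl = []
  · subst hnil; rfl
  · simp only [if_neg hnil]
    have hs : PySem.List.sorted tl pvKey ≠ [] := by
      rw [Ne, PySem.List.sorted_eq_nil_iff]; exact hnil
    match h : PySem.List.sorted tl pvKey with
    | [] => exact absurd h hs
    | [a] => simp [pvFirstTwo, PySem.List.pyGetD, PySem.List.pyGet?, PySem.List.pyIdx?]
    | a :: b :: t =>
      have h0 : (0:Int) ≤ (t.length:Int) + 1 := by positivity
      simp [pvFirstTwo, PySem.List.pyGetD, PySem.List.pyGet?, PySem.List.pyIdx?, h0]
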